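-- pv_equiv track=rewrite | github.com/KobiWare/ctfwriteups | ctfs/bearcatctf2026/crypto/crazy-curves/scripts/solve2.py | circle_mul
-- ===== SOURCE A (Python) =====
-- def modinv(x, m):
--     return pow(x, m - 2, m)
--
-- def circle_add(P, Q, a, b, c, p):
--     """Add two points on circle (x-a)^2 + (y-b)^2 = c^2 mod p"""
--     ptx = (P[0] - a) % p
--     pty = (P[1] - b) % p
--     qtx = (Q[0] - a) % p
--     qty = (Q[1] - b) % p
--     c_inv_loc = modinv(c, p)
--     xval = (ptx*qtx - qty*pty) * c_inv_loc % p + a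
--     yval = (ptx*qty + qtx*pty) * c_inv_loc % p + b
--     return (xval % p, yval % p)
--
-- def circle_mul(n, P, a, b, c, p):
--     """Scalar multiply on circle"""
--     O = ((a + c) % p, b % p)  # identity
--     R = O
--     Q = P
--     while n:
--         if n & 1:
--             R = circle_add(R, Q, a, b, c, p)
--         Q = circle_add(Q, Q, a, b, c, p)
--         n >>= 1
--     return R
-- ===== SOURCE B (Python) =====
-- def modinv(x, m):
--     return pow(x, m - 2, m)
--
-- def circle_add(P, Q, a, b, c, p):
--     """Add two points on circle (x-a)^2 + (y-b)^2 = c^2 mod p"""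
--     ptx = (P[0] - a) % p
--     pty = (P[1] - b) % p
--     qtx = (Q[0] - a) % p
--     qty = (Q[1] - b) % p
--     c_inv_loc = modinv(c, p)
--     xval = (ptx*qtx - qty*pty) * c_inv_loc % p + a
--     yval = (ptx*qty + qtx*pty) * c_inv_loc % p + b
--     return (xval % p, yval % p)
--
-- def circle_mul(n, P, a, b, c, p):
--     """Scalar multiply on circle: top-down recursion by halving (no accumulator ladder)."""
--     if n == 0:
--         return ((a + c) % p, b % p)
--     half = circle_mul(n >> 1, circle_add(P, P, a, b, c, p), a, b, c, p)
--     return circle_add(half, P, a, b, c, p) if n & 1 else half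
-- ===== Notes on version B (the rewrite author's own statement) =====
-- stated objective: simpler
-- what changed: Replaces A's iterative LSB-first double-and-add ladder (accumulator R plus a separately maintained doubled point Q) by a top-down recursion on the halved scalar with no accumulator; equal because circle_add is commutative and associative mod p, so the same multiset of doublings added in the opposite order gives the same point.
import Mathlib
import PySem

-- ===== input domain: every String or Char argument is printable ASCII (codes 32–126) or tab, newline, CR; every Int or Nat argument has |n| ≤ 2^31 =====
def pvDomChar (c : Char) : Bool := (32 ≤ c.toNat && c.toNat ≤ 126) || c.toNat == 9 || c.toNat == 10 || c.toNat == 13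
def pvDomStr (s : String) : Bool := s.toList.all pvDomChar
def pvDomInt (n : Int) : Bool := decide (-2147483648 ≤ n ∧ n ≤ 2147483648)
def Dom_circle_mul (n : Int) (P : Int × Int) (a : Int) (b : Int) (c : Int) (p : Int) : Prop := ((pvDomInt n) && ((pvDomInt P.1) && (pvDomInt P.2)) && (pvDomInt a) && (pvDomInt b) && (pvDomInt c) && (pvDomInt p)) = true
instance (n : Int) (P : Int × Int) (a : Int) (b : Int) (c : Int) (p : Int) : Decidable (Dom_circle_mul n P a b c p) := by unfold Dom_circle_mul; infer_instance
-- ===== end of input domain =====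

-- B replaces A's iterative double-and-add ladder (accumulator R plus running doubled point Q)
-- by a top-down recursion on the halved scalar; simpler decomposition, return value identical on Pre_.

-- ===== PORT A =====

-- built-in pow(base, exp, mod) by square-and-multiply, reducing mod m at every step, as CPython
-- does (PySem.Int.powMod is extensionally the same for m ≥ 1 but computes b^e in full and cannot
-- evaluate on Dom-sized exponents).
def powModAux (b : Int) (e : Nat) (acc m : Int) : Int :=
  if h : e = 0 then acc
  else powModAux (PySem.Int.mod (b * b) m) (e / 2)
    (if e % 2 = 1 then PySem.Int.mod (acc * b) m else acc) m
termination_by e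
decreasing_by omega

-- pow(x, m - 2, m): for m ≥ 2 the exponent is nonnegative; for m ≤ 1 CPython first inverts x
-- modulo m (via extended gcd; Int.gcdA is a Bezout coefficient with x*gcdA ≡ gcd = 1 [ZMOD m],
-- and the running floor-mod reduction makes the representative choice irrelevant) and then raises
-- the inverse to the positive exponent 2 - m.  Exact wherever Python returns (Pre_ excludes the
-- ValueError case gcd(x, m) ≠ 1 with a negative exponent, and m = 0).
def modinv (x m : Int) : Int :=
  if 0 ≤ m - 2 then powModAux (PySem.Int.mod x m) (m - 2).toNat (PySem.Int.mod 1 m) m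
  else powModAux (PySem.Int.mod (Int.gcdA x m) m) (2 - m).toNat (PySem.Int.mod 1 m) m

def circle_add (P Q : Int × Int) (a b c p : Int) : Int × Int :=
  let ptx := PySem.Int.mod (P.1 - a) p
  let pty := PySem.Int.mod (P.2 - b) p
  let qtx := PySem.Int.mod (Q.1 - a) p
  let qty := PySem.Int.mod (Q.2 - b) p
  let c_inv_loc := modinv c p
  let xval := PySem.Int.mod ((ptx * qtx - qty * pty) * c_inv_loc) p + a
  let yval := PySem.Int.mod ((ptx * qty + qtx * pty) * c_inv_loc) p + b
  (PySem.Int.mod xval p, PySem.Int.mod yval p)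

-- A's while loop: `while n: if n & 1: R = add(R,Q); Q = add(Q,Q); n >>= 1`
-- (the n ≤ 0 stop is Python's n = 0 exit; n < 0 loops forever in Python and is outside Pre_)
def circle_mul_loop (n : Int) (R Q : Int × Int) (a b c p : Int) : Int × Int :=
  if n ≤ 0 then R
  else
    circle_mul_loop (PySem.Int.floordiv n 2)
      (if PySem.Int.band n 1 = 1 then circle_add R Q a b c p else R)
      (circle_add Q Q a b c p) a b c p
termination_by n.toNat
decreasing_by
  rw [PySem.Int.floordiv_eq_ediv_of_pos (b := 2) (by omega)]
  omega

def circle_mul (n : Int) (P : Int × Int) (a : Int) (b : Int) (c : Int) (p : Int) : Int × Int :=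
  circle_mul_loop n ((PySem.Int.mod (a + c) p), PySem.Int.mod b p) P a b c p

-- ===== PORT B =====

-- B: if n == 0: O; half = circle_mul(n >> 1, P+P); return half + P if n & 1 else half
-- (n ≤ 0 guard: Python recurses forever for n < 0, outside Pre_)
def circle_mul_alt (n : Int) (P : Int × Int) (a : Int) (b : Int) (c : Int) (p : Int) : Int × Int :=
  if n ≤ 0 then (PySem.Int.mod (a + c) p, PySem.Int.mod b p)
  else
    let half := circle_mul_alt (PySem.Int.floordiv n 2) (circle_add P P a b c p) a b c p
    if PySem.Int.band n 1 = 1 then circle_add half P a b c p else half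
termination_by n.toNat
decreasing_by
  rw [PySem.Int.floordiv_eq_ediv_of_pos (b := 2) (by omega)]
  omega

-- ===== PRECONDITION & SPEC =====
-- Pre_ excludes exactly the inputs where A does not return: n < 0 (the while loop never
-- terminates), p = 0 (ZeroDivisionError in `% p`), and p < 0 with n > 0 and gcd(c, p) ≠ 1
-- (pow(c, p-2, p) has a negative exponent and raises ValueError for non-invertible c).
def Pre_circle_mul (n : Int) (P : Int × Int) (a : Int) (b : Int) (c : Int) (p : Int) : Prop :=
  0 ≤ n ∧ p ≠ 0 ∧ (0 < p ∨ n = 0 ∨ Int.gcd c p = 1)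
instance (n : Int) (P : Int × Int) (a : Int) (b : Int) (c : Int) (p : Int) : Decidable (Pre_circle_mul n P a b c p) := by unfold Pre_circle_mul; infer_instance

def pvWitness_circle_mul : Int × (Int × Int) × Int × Int × Int × Int := (3, (1, 0), 0, 0, 1, 5)

def Spec_circle_mul (n : Int) (P : Int × Int) (a : Int) (b : Int) (c : Int) (p : Int) (out : Int × Int) : Prop := out = circle_mul_alt n P a b c p
instance (n : Int) (P : Int × Int) (a : Int) (b : Int) (c : Int) (p : Int) (out : Int × Int) : Decidable (Spec_circle_mul n P a b c p out) := by unfold Spec_circle_mul; infer_instance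

-- ===== CLAIM (what is proved, stated in full; the proofs are below) =====
def Claim_equal_circle_mul : Prop := ∀ (n : Int) (P : Int × Int) (a : Int) (b : Int) (c : Int) (p : Int), Dom_circle_mul n P a b c p → Pre_circle_mul n P a b c p → Spec_circle_mul n P a b c p (circle_mul n P a b c p)

-- ===== LEMMAS AND PROOFS =====

-- Python's % p is determined by the residue class mod p (range (p,0] or [0,p) by sign of p):
-- congruent inputs give EQUAL outputs.  Stated via ZMod p.natAbs so the goal becomes a ring identity.
theorem pymod_congr {p : Int} (hp : p ≠ 0) {x y : Int}
    (h : ((x : ZMod p.natAbs) = (y : ZMod p.natAbs))) :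
    PySem.Int.mod x p = PySem.Int.mod y p := by
  have hmod : x ≡ y [ZMOD ((p.natAbs : Nat) : Int)] :=
    (ZMod.intCast_eq_intCast_iff' x y p.natAbs).mp h
  have hdvd : p ∣ y - x := (Int.natAbs_dvd).mp hmod.dvd
  have h1 := PySem.Int.floordiv_mul_add_mod x p
  have h2 := PySem.Int.floordiv_mul_add_mod y p
  have hd : p ∣ PySem.Int.mod x p - PySem.Int.mod y p := by
    obtain ⟨k, hk⟩ := hdvd
    exact ⟨-k - PySem.Int.floordiv x p + PySem.Int.floordiv y p, by linarith⟩
  have habs : |p| ∣ PySem.Int.mod x p - PySem.Int.mod y p := (abs_dvd _ _).mpr hd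
  refine sub_eq_zero.mp (Int.eq_zero_of_abs_lt_dvd habs ?_)
  rcases lt_or_gt_of_ne hp with hneg | hpos
  · obtain ⟨bx1, bx2⟩ := PySem.Int.mod_neg_bounds (a := x) hneg
    obtain ⟨by1, by2⟩ := PySem.Int.mod_neg_bounds (a := y) hneg
    rw [abs_of_neg hneg]; rw [abs_lt]; omega
  · have bx1 := PySem.Int.mod_nonneg (a := x) hpos
    have bx2 := PySem.Int.mod_lt (a := x) hpos
    have by1 := PySem.Int.mod_nonneg (a := y) hpos
    have by2 := PySem.Int.mod_lt (a := y) hpos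
    rw [abs_of_pos hpos]; rw [abs_lt]; omega

-- casting a PySem.Int.mod _ p into ZMod p.natAbs drops the mod
theorem cast_pymod (p : Int) (hp : p ≠ 0) (x : Int) :
    ((PySem.Int.mod x p : Int) : ZMod p.natAbs) = (x : ZMod p.natAbs) := by
  refine (ZMod.intCast_eq_intCast_iff' _ _ _).mpr ?_
  refine (Int.modEq_iff_dvd.mpr ?_)
  rw [Int.natAbs_dvd]
  have h1 := PySem.Int.floordiv_mul_add_mod x p
  exact ⟨PySem.Int.floordiv x p, by linarith⟩

theorem circle_add_comm (P Q : Int × Int) (a b c p : Int) :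
    circle_add P Q a b c p = circle_add Q P a b c p := by
  simp only [circle_add]
  refine Prod.ext ?_ ?_ <;>
  · show PySem.Int.mod (PySem.Int.mod _ _ + _) _ = PySem.Int.mod (PySem.Int.mod _ _ + _) _
    congr 3
    ring

theorem circle_add_assoc (P Q W : Int × Int) (a b c p : Int) (hp : p ≠ 0) :
    circle_add (circle_add P Q a b c p) W a b c p
      = circle_add P (circle_add Q W a b c p) a b c p := by
  simp only [circle_add]
  refine Prod.ext ?_ ?_ <;>
  · apply pymod_congr hp
    push_cast [cast_pymod p hp]
    ring

-- the exchange law needed to move a pending addend past the ladder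
theorem circle_add_exch (X Y Z : Int × Int) (a b c p : Int) (hp : p ≠ 0) :
    circle_add (circle_add X Y a b c p) Z a b c p
      = circle_add (circle_add X Z a b c p) Y a b c p := by
  rw [circle_add_assoc X Y Z a b c p hp, circle_add_comm Y Z,
    ← circle_add_assoc X Z Y a b c p hp]

-- B's recursion with an explicit seed (B itself seeds with the identity point O)
def mulSeed (n : Int) (R Q : Int × Int) (a b c p : Int) : Int × Int :=
  if n ≤ 0 then R
  else
    let h := mulSeed (PySem.Int.floordiv n 2) R (circle_add Q Q a b c p) a b c p
    if PySem.Int.band n 1 = 1 then circle_add h Q a b c p else h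
termination_by n.toNat
decreasing_by
  rw [PySem.Int.floordiv_eq_ediv_of_pos (b := 2) (by omega)]
  omega

theorem mulSeed_add (n : Int) (R X Q : Int × Int) (a b c p : Int) (hp : p ≠ 0) :
    mulSeed n (circle_add R X a b c p) Q a b c p
      = circle_add (mulSeed n R Q a b c p) X a b c p := by
  by_cases h : n ≤ 0
  · conv_lhs => rw [mulSeed]
    conv_rhs => rw [mulSeed]
    rw [if_pos h, if_pos h]
  · rw [mulSeed, if_neg h]
    conv_rhs => rw [mulSeed, if_neg h]
    rw [mulSeed_add (PySem.Int.floordiv n 2) R X (circle_add Q Q a b c p) a b c p hp]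
    by_cases hb : PySem.Int.band n 1 = 1
    · simp only [if_pos hb]
      exact circle_add_exch _ X Q a b c p hp
    · simp only [if_neg hb]
termination_by n.toNat
decreasing_by
  rw [PySem.Int.floordiv_eq_ediv_of_pos (b := 2) (by omega)]
  omega

theorem loop_eq_mulSeed (n : Int) (R Q : Int × Int) (a b c p : Int) (hp : p ≠ 0) :
    circle_mul_loop n R Q a b c p = mulSeed n R Q a b c p := by
  by_cases h : n ≤ 0
  · conv_lhs => rw [circle_mul_loop]
    conv_rhs => rw [mulSeed]
    rw [if_pos h, if_pos h]
  · rw [circle_mul_loop, if_neg h]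
    conv_rhs => rw [mulSeed, if_neg h]
    rw [loop_eq_mulSeed (PySem.Int.floordiv n 2) _ _ a b c p hp]
    by_cases hb : PySem.Int.band n 1 = 1
    · simp only [if_pos hb]
      exact mulSeed_add _ R Q _ a b c p hp
    · simp only [if_neg hb]
termination_by n.toNat
decreasing_by
  rw [PySem.Int.floordiv_eq_ediv_of_pos (b := 2) (by omega)]
  omega

theorem alt_eq_mulSeed (n : Int) (P : Int × Int) (a b c p : Int) :
    circle_mul_alt n P a b c p
      = mulSeed n (PySem.Int.mod (a + c) p, PySem.Int.mod b p) P a b c p := by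
  by_cases h : n ≤ 0
  · conv_lhs => rw [circle_mul_alt]
    conv_rhs => rw [mulSeed]
    rw [if_pos h, if_pos h]
  · rw [circle_mul_alt, if_neg h]
    conv_rhs => rw [mulSeed, if_neg h]
    rw [alt_eq_mulSeed (PySem.Int.floordiv n 2) (circle_add P P a b c p) a b c p]
termination_by n.toNat
decreasing_by
  rw [PySem.Int.floordiv_eq_ediv_of_pos (b := 2) (by omega)]
  omega

-- ===== VERDICT (by name: the statement is the Claim_ definition above) =====
theorem circle_mul_spec : Claim_equal_circle_mul := by
  intro n P a b c p _ hpre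
  obtain ⟨-, hp, -⟩ := hpre
  show circle_mul n P a b c p = circle_mul_alt n P a b c p
  rw [circle_mul, loop_eq_mulSeed n _ P a b c p (by omega),
    alt_eq_mulSeed n P a b c p]
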